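-- pv_equiv track=rewrite | github.com/WarpedWing/MARS | src/mars/pipeline/lf_processor/lf_catalog.py | _has_unique_exact_match
-- ===== SOURCE A (Python) =====
-- def _count_exact_matches(record: dict) -> int:
--     """
--     Count how many exact matches (tables_equal+columns_equal or hash) a record has.
--
--     Args:
--         record: Database record with exact_matches list
--
--     Returns:
--         Number of exact matches with full schema match (not just table names)
--     """
--     exact_matches = record.get("exact_matches", [])
--     return sum(1 for m in exact_matches if m.get("match") in ("tables_equal+columns_equal", "hash"))
--
-- def _has_unique_exact_match(db_entries: list, exemplar_name: str) -> bool: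
--     """
--     Check if all databases in db_entries have a UNIQUE exact match to this exemplar.
--
--     A unique exact match means:
--     1. The record has exactly ONE tables_equal+columns_equal (or hash) match
--     2. That match is for the specified exemplar_name
--
--     If any database matches multiple versions exactly (e.g., v1 and v3 have identical
--     schemas), this returns False because we can't uniquely attribute the data.
--
--     Args:
--         db_entries: List of database entries with record data
--         exemplar_name: Name of the exemplar to check for unique match
--
--     Returns:
--         True if all entries have a unique exact match to this exemplar
--     """
--     for entry in db_entries:
--         record = entry.get("record", {})
--         exact_count = _count_exact_matches(record)
--
--         # If multiple versions match exactly, not unique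
--         if exact_count != 1:
--             return False
--
--         # Check if the single exact match is for this exemplar
--         exact_matches = record.get("exact_matches", [])
--         is_match = False
--         for match in exact_matches:
--             if match.get("label") == exemplar_name and match.get("match") in ("tables_equal+columns_equal", "hash"):
--                 is_match = True
--                 break
--
--         if not is_match:
--             return False
--
--     return True
-- ===== SOURCE B (Python) =====
-- _EXACT_KINDS = {"tables_equal+columns_equal", "hash"}
--
-- def _has_unique_exact_match(db_entries: list, exemplar_name: str) -> bool:
--     def entry_ok(entry):
--         record = entry.get("record", {})
--         quals = [m for m in record.get("exact_matches", [])
--                  if m.get("match") in _EXACT_KINDS]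
--         return len(quals) == 1 and quals[0].get("label") == exemplar_name
--     return all(entry_ok(entry) for entry in db_entries)
-- ===== Notes on version B (the rewrite author's own statement) =====
-- stated objective: simpler
-- what changed: B builds the filtered list of qualifying exact matches once per entry and checks len==1 plus the label of its single element, replacing A's separate counting pass plus a second label-scan loop with early-exit returns; entries are combined with all(...).
import Mathlib
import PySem

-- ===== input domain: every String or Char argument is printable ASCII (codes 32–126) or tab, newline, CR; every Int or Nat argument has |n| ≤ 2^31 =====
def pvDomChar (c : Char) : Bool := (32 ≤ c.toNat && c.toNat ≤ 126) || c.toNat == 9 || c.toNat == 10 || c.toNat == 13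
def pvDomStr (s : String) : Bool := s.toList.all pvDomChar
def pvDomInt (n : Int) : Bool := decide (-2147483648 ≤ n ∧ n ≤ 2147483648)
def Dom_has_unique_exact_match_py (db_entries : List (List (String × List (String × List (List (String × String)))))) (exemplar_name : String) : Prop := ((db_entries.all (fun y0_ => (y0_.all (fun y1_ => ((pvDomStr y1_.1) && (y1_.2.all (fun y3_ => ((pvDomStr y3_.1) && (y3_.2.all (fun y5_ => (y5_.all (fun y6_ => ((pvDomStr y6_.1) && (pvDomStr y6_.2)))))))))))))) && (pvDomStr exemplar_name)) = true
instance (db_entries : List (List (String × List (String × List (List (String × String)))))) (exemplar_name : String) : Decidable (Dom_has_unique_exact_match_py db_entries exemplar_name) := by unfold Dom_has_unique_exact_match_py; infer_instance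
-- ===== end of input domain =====

-- B replaces A's count-pass plus second label-scan loop (with early returns) by one filtered
-- list per entry checked for length 1 and its single element's label, combined with List.all.

-- shared predicate: m.get("match") in ("tables_equal+columns_equal", "hash")
def pvIsExact (m : List (String × String)) : Bool :=
  (PySem.Dict.mk m).get? "match" == some "tables_equal+columns_equal"
    || (PySem.Dict.mk m).get? "match" == some "hash"

-- ===== PORT A =====
-- _count_exact_matches: sum(1 for m in exact_matches if …)
def pvCountExact (record : List (String × List (List (String × String)))) : Int :=
  let exact_matches := (PySem.Dict.mk record).getD "exact_matches" []
  exact_matches.foldl (fun acc m => if pvIsExact m then acc + 1 else acc) 0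

-- the inner 'for match in exact_matches: … break' loop of A
def pvFindLabel (ems : List (List (String × String))) (exemplar_name : String) : Bool :=
  match ems with
  | [] => false
  | m :: rest =>
      if ((PySem.Dict.mk m).get? "label" == some exemplar_name) && pvIsExact m then true
      else pvFindLabel rest exemplar_name

-- the outer 'for entry in db_entries' loop of A, with its early returns
def pvGoA (db_entries : List (List (String × List (String × List (List (String × String)))))) (exemplar_name : String) : Bool :=
  match db_entries with
  | [] => true
  | entry :: rest =>
      let record := (PySem.Dict.mk entry).getD "record" []
      if pvCountExact record ≠ 1 then false
      else
        let exact_matches := (PySem.Dict.mk record).getD "exact_matches" []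
        if !(pvFindLabel exact_matches exemplar_name) then false
        else pvGoA rest exemplar_name

def has_unique_exact_match_py (db_entries : List (List (String × List (String × List (List (String × String)))))) (exemplar_name : String) : Bool :=
  pvGoA db_entries exemplar_name

-- ===== PORT B =====
def has_unique_exact_match_py_alt (db_entries : List (List (String × List (String × List (List (String × String)))))) (exemplar_name : String) : Bool :=
  db_entries.all (fun entry =>
    let record := (PySem.Dict.mk entry).getD "record" []
    let quals := ((PySem.Dict.mk record).getD "exact_matches" []).filter pvIsExact
    -- len(quals) == 1 and quals[0].get("label") == exemplar_name
    match quals with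
    | [m] => (PySem.Dict.mk m).get? "label" == some exemplar_name
    | _ => false)

-- ===== PRECONDITION & SPEC =====
def Spec_has_unique_exact_match_py (db_entries : List (List (String × List (String × List (List (String × String)))))) (exemplar_name : String) (out : Bool) : Prop := out = has_unique_exact_match_py_alt db_entries exemplar_name
instance (db_entries : List (List (String × List (String × List (List (String × String)))))) (exemplar_name : String) (out : Bool) : Decidable (Spec_has_unique_exact_match_py db_entries exemplar_name out) := by unfold Spec_has_unique_exact_match_py; infer_instance

-- ===== CLAIM (what is proved, stated in full; the proofs are below) =====
def Claim_equal_has_unique_exact_match_py : Prop := ∀ (db_entries : List (List (String × List (String × List (List (String × String)))))) (exemplar_name : String), Dom_has_unique_exact_match_py db_entries exemplar_name → Spec_has_unique_exact_match_py db_entries exemplar_name (has_unique_exact_match_py db_entries exemplar_name)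

-- ===== LEMMAS AND PROOFS =====

lemma pvCount_foldl (l : List (List (String × String))) (a : Int) :
    l.foldl (fun acc m => if pvIsExact m then acc + 1 else acc) a
      = a + (l.filter pvIsExact).length := by
  induction l generalizing a with
  | nil => simp
  | cons m rest ih =>
      by_cases h : pvIsExact m = true <;>
        simp [List.foldl, List.filter, h, ih] <;> ring

lemma pvCountExact_eq (record : List (String × List (List (String × String)))) :
    pvCountExact record
      = ((((PySem.Dict.mk record).getD "exact_matches" []).filter pvIsExact).length : Int) := by
  unfold pvCountExact
  simpa using pvCount_foldl ((PySem.Dict.mk record).getD "exact_matches" []) 0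

lemma pvFindLabel_none (ems : List (List (String × String))) (ex : String)
    (h : ems.filter pvIsExact = []) : pvFindLabel ems ex = false := by
  induction ems with
  | nil => rfl
  | cons m rest ih =>
      simp only [List.filter] at h
      rcases hm : pvIsExact m with _ | _
      · simp [pvFindLabel, hm, ih (by simpa [hm] using h)]
      · simp [hm] at h
lemma pvFindLabel_single (ems : List (List (String × String))) (ex : String)
    (m : List (String × String)) (h : ems.filter pvIsExact = [m]) :
    pvFindLabel ems ex = ((PySem.Dict.mk m).get? "label" == some ex) := by
  induction ems with
  | nil => simp at h
  | cons a rest ih =>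
      rcases ha : pvIsExact a with _ | _
      · rw [List.filter_cons_of_neg (by simp [ha])] at h
        rw [pvFindLabel]
        simp only [ha, Bool.and_false, if_false]
        exact ih h
      · rw [List.filter_cons_of_pos ha] at h
        injection h with h1 h2
        subst h1
        rw [pvFindLabel, pvFindLabel_none rest ex h2]
        simp only [ha, Bool.and_true]
        cases hl : ((PySem.Dict.mk a).get? "label" == some ex) <;> simp [hl]

lemma pvGoA_eq_alt (db : List (List (String × List (String × List (List (String × String)))))) (ex : String) :
    pvGoA db ex = has_unique_exact_match_py_alt db ex := by
  induction db with
  | nil => rfl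
  | cons entry rest ih =>
      unfold pvGoA has_unique_exact_match_py_alt
      simp only [List.all_cons]
      rw [show (rest.all _) = has_unique_exact_match_py_alt rest ex from rfl, ← ih]
      simp only [pvCountExact_eq]
      rcases hq : (((PySem.Dict.mk ((PySem.Dict.mk entry).getD "record" [])).getD "exact_matches" []).filter pvIsExact) with _ | ⟨m, tl⟩
      · simp [hq]
      · rcases tl with _ | ⟨m2, tl2⟩
        · rw [pvFindLabel_single _ ex m hq]
          simp only [List.length_cons, List.length_nil]
          norm_num
          by_cases hl : (PySem.Dict.mk m).get? "label" = some ex <;> simp [hl]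
        · simp [hq]
          omega

-- ===== VERDICT (by name: the statement is the Claim_ definition above) =====
theorem has_unique_exact_match_py_spec : Claim_equal_has_unique_exact_match_py := by
  intro db ex _
  unfold Spec_has_unique_exact_match_py has_unique_exact_match_py
  exact pvGoA_eq_alt db ex
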